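-- pv_equiv track=rewrite | github.com/dair-iitd/OxKBC | Rule-Mining-Distmult/utils.py | get_ent_to_rel
-- ===== SOURCE A (Python) =====
-- def get_ent_to_rel(data_arr):
--     ent_to_rel={}
--     for data in data_arr:
--         pair=(data[0],data[2])
--         if pair not in ent_to_rel:
--             ent_to_rel[pair]=[]
--         ent_to_rel[pair].append(data[1])
--     return ent_to_rel
-- ===== SOURCE B (Python) =====
-- def get_ent_to_rel(data_arr):
--     # Pass 1: the distinct (head, tail) pairs in first-appearance order.
--     pairs = []
--     seen = set()
--     for data in data_arr:
--         p = (data[0], data[2])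
--         if p not in seen:
--             seen.add(p)
--             pairs.append(p)
--     # Pass 2: for each pair, gather its relations by scanning the input.
--     return {p: [d[1] for d in data_arr if (d[0], d[2]) == p] for p in pairs}
-- ===== Notes on version B (the rewrite author's own statement) =====
-- stated objective: alternative
-- what changed: Replaces the single hash-insertion grouping pass with a two-phase plan: one pass collecting the distinct (head,tail) pairs in first-appearance order, then a dict comprehension that builds each group's relation list by a fresh scan of the input.
import Mathlib
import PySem

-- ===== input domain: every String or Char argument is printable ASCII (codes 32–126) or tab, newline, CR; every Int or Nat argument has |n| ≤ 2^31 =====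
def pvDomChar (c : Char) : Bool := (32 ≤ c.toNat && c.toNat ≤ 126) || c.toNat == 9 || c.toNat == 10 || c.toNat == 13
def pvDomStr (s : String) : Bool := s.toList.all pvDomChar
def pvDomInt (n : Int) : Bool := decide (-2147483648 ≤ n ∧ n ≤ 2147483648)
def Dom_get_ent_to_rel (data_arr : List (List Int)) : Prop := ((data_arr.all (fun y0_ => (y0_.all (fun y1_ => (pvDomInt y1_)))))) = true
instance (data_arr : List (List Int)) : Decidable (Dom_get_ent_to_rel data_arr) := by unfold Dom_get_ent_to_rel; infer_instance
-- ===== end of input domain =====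

-- B replaces A's single hash-insertion grouping pass by a dedup pass over the pairs followed by
-- a per-pair rescan building each group's list (alternative decomposition, not claimed faster).

-- ===== PORT A =====
-- A: one pass, a dict from (data[0], data[2]) to the list of data[1]'s, built by setdefault-style
-- insert + in-place append (ported as Dict.modify, which is d[k] = f(d.get(k, dflt))).
def get_ent_to_rel (data_arr : List (List Int)) : List (Int × Int × List Int) :=
  let ent_to_rel : PySem.Dict (Int × Int) (List Int) :=
    data_arr.foldl (fun ent_to_rel data =>
      let pair : Int × Int := (PySem.List.pyGetD data 0 0, PySem.List.pyGetD data 2 0)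
      let ent_to_rel := if ent_to_rel.contains pair then ent_to_rel
                        else ent_to_rel.insert pair ([] : List Int)
      -- ent_to_rel[pair].append(data[1])
      ent_to_rel.modify pair [] (fun l => l ++ [PySem.List.pyGetD data 1 0]))
    PySem.Dict.empty
  ent_to_rel.items.map (fun p => (p.1.1, p.1.2, p.2))

-- ===== PORT B =====
-- B: pass 1 collects the distinct pairs in first-appearance order (list + membership set);
-- pass 2 builds each group's relation list by a fresh scan (the dict comprehension).
def get_ent_to_rel_alt (data_arr : List (List Int)) : List (Int × Int × List Int) :=
  let st : List (Int × Int) × PySem.Set (Int × Int) :=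
    data_arr.foldl (fun st data =>
      let p : Int × Int := (PySem.List.pyGetD data 0 0, PySem.List.pyGetD data 2 0)
      if PySem.Set.contains st.2 p then st
      else (st.1 ++ [p], PySem.Set.add st.2 p))
    ([], PySem.Set.empty)
  st.1.map (fun p => (p.1, p.2,
    (data_arr.filter (fun d =>
        ((PySem.List.pyGetD d 0 0, PySem.List.pyGetD d 2 0) == p))).map
      (fun d => PySem.List.pyGetD d 1 0)))

-- ===== PRECONDITION & SPEC =====
-- Pre_ excludes exactly the inputs where Python A raises IndexError: a row shorter than 3
-- elements (data[0]/data[1]/data[2]). B raises there too.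
def Pre_get_ent_to_rel (data_arr : List (List Int)) : Prop :=
  ∀ row ∈ data_arr, 3 ≤ row.length
instance (data_arr : List (List Int)) : Decidable (Pre_get_ent_to_rel data_arr) := by
  unfold Pre_get_ent_to_rel; infer_instance
def pvWitness_get_ent_to_rel : List (List Int) := [[1, 2, 3], [1, 5, 3], [4, 2, 6]]
def Spec_get_ent_to_rel (data_arr : List (List Int)) (out : List (Int × Int × List Int)) : Prop := out = get_ent_to_rel_alt data_arr
instance (data_arr : List (List Int)) (out : List (Int × Int × List Int)) : Decidable (Spec_get_ent_to_rel data_arr out) := by unfold Spec_get_ent_to_rel; infer_instance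

-- ===== CLAIM (what is proved, stated in full; the proofs are below) =====
def Claim_equal_get_ent_to_rel : Prop := ∀ (data_arr : List (List Int)), Dom_get_ent_to_rel data_arr → Pre_get_ent_to_rel data_arr → Spec_get_ent_to_rel data_arr (get_ent_to_rel data_arr)

-- ===== LEMMAS AND PROOFS =====

-- the pair key and the relation value of a row
def pvKey (data : List Int) : Int × Int := (PySem.List.pyGetD data 0 0, PySem.List.pyGetD data 2 0)
def pvRel (data : List Int) : Int := PySem.List.pyGetD data 1 0

-- A's loop body ('if pair not in d: d[pair] = []' then append) is the canonical modify body.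
lemma pvBodyA_eq (d : PySem.Dict (Int × Int) (List Int)) (k : Int × Int) (x : Int) :
    (if d.contains k then d else d.insert k ([] : List Int)).modify k []
        (fun l => l ++ [x]) =
      d.modify k [] (fun l => l ++ [x]) := by
  by_cases h : d.contains k
  · simp [h]
  · simp only [h, Bool.false_eq_true, if_false]
    apply PySem.Dict.ext
    have hk : ∀ p ∈ d.items, p.1 ≠ k := by
      intro p hp hpk
      have := PySem.Dict.mem_keys_of_mem_items d hp
      rw [hpk] at this
      rw [← PySem.Dict.contains_iff_mem_keys] at this
      simp [h] at this
    simp only [PySem.Dict.modify]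
    rw [PySem.Dict.items_insert_of_contains _ _ (PySem.Dict.contains_insert_self d k []),
        PySem.Dict.items_insert_of_not_contains d _ (by simpa using h),
        PySem.Dict.items_insert_of_not_contains d _ (by simpa using h),
        PySem.Dict.getD_insert_self, PySem.Dict.getD_of_not_contains d _ (by simpa using h)]
    rw [List.map_append]
    have hmap : List.map (fun p => if (p.1 == k) = true then (k, ([]:List Int) ++ [x]) else p)
        d.items = List.map id d.items :=
      List.map_congr_left (fun p hp => by simp [hk p hp])
    rw [hmap, List.map_id]
    simp

-- B's pass 1, with the list and the set kept equal, is Set.update.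
lemma pvFoldB_eq (l : List (List Int)) (s : PySem.Set (Int × Int)) :
    l.foldl (fun (st : List (Int × Int) × PySem.Set (Int × Int)) data =>
        let p : Int × Int := (PySem.List.pyGetD data 0 0, PySem.List.pyGetD data 2 0)
        if PySem.Set.contains st.2 p then st
        else (st.1 ++ [p], PySem.Set.add st.2 p)) (s, s) =
      (PySem.Set.update s (l.map pvKey), PySem.Set.update s (l.map pvKey)) := by
  induction l generalizing s with
  | nil => simp [PySem.Set.update]
  | cons a l ih =>
      simp only [List.foldl_cons, List.map_cons]
      by_cases h : (PySem.List.pyGetD a 0 0, PySem.List.pyGetD a 2 0) ∈ s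
      · have hadd : PySem.Set.add s (PySem.List.pyGetD a 0 0, PySem.List.pyGetD a 2 0) = s := by
          simp [PySem.Set.add, h]
        simpa [pvKey, h, PySem.Set.update, hadd] using ih s
      · have hadd : PySem.Set.add s (PySem.List.pyGetD a 0 0, PySem.List.pyGetD a 2 0)
            = s ++ [(PySem.List.pyGetD a 0 0, PySem.List.pyGetD a 2 0)] := by
          simp [PySem.Set.add, h]
        simpa [pvKey, h, PySem.Set.update, hadd]
          using ih (s ++ [(PySem.List.pyGetD a 0 0, PySem.List.pyGetD a 2 0)])

-- a dict with Nodup keys is its keys paired with their getD values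
lemma pvItems_eq_keys_map (d : PySem.Dict (Int × Int) (List Int)) (h : d.keys.Nodup) :
    d.items = d.keys.map (fun k => (k, d.getD k [])) := by
  have : d.keys = d.items.map (·.1) := by simp only [PySem.Dict.keys]
  rw [this, List.map_map]
  have hmap : List.map ((fun k => (k, d.getD k [])) ∘ fun x => x.1) d.items
      = List.map id d.items := by
    apply List.map_congr_left
    intro p hp
    have hmem : (p.1, p.2) ∈ d.items := by simpa using hp
    have := PySem.Dict.getD_of_mem_items d hmem h ([] : List Int)
    simp [Function.comp, this]
  rw [hmap, List.map_id]

-- A's dict is the canonical modify-fold over (key, rel) pairs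
lemma pvDictA_eq (data_arr : List (List Int)) :
    data_arr.foldl (fun ent_to_rel data =>
        let pair : Int × Int := (PySem.List.pyGetD data 0 0, PySem.List.pyGetD data 2 0)
        let ent_to_rel := if ent_to_rel.contains pair then ent_to_rel
                          else ent_to_rel.insert pair ([] : List Int)
        ent_to_rel.modify pair [] (fun l => l ++ [PySem.List.pyGetD data 1 0]))
      PySem.Dict.empty =
    (data_arr.map (fun data => (pvKey data, pvRel data))).foldl
      (fun d p => d.modify p.1 [] (fun l => l ++ [p.2])) PySem.Dict.empty := by
  rw [List.foldl_map]
  apply PySem.List.foldl_congr_mem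
  intro d data _
  simpa [pvKey, pvRel] using pvBodyA_eq d (pvKey data) (pvRel data)

-- general fact used twice: congruence of foldl on equal bodies over members
lemma pvFilterMap (data_arr : List (List Int)) (k : Int × Int) :
    ((data_arr.map (fun data => (pvKey data, pvRel data))).filter
        (fun p => p.1 == k)).map (fun p => p.2) =
      (data_arr.filter (fun d => (pvKey d == k))).map pvRel := by
  rw [List.filter_map, List.map_map]
  rfl

theorem get_ent_to_rel_eq (data_arr : List (List Int)) :
    get_ent_to_rel data_arr = get_ent_to_rel_alt data_arr := by
  unfold get_ent_to_rel get_ent_to_rel_alt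
  simp only []
  rw [pvDictA_eq]
  have hfold := pvFoldB_eq data_arr PySem.Set.empty
  set kvs := data_arr.map (fun data => (pvKey data, pvRel data)) with hkvs
  set dA := kvs.foldl (fun d p => d.modify p.1 [] (fun l => l ++ [p.2])) PySem.Dict.empty with hdA
  have hkeys : dA.keys = PySem.Set.ofList (data_arr.map pvKey) := by
    rw [hdA]
    have := PySem.Dict.keys_foldl_modify_key kvs (fun p => p.1) ([] : List Int)
      (fun _ p => fun l => l ++ [p.2]) PySem.Dict.empty
    simp only at this
    rw [this, PySem.Dict.keys_empty, hkvs, List.map_map]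
    simp only [PySem.Set.update, PySem.Set.ofList_eq_foldl]
    rfl
  have hnodup : dA.keys.Nodup := by
    rw [hdA]
    exact PySem.Dict.nodup_keys_foldl_modify_key kvs (fun p => p.1) ([] : List Int)
      (fun _ p => fun l => l ++ [p.2]) PySem.Dict.empty (by simp [PySem.Dict.keys_empty])
  have hgetD : ∀ k, dA.getD k [] = (data_arr.filter (fun d => (pvKey d == k))).map pvRel := by
    intro k
    rw [hdA]
    have := PySem.Dict.getD_foldl_modify_append kvs PySem.Dict.empty k
    rw [this, PySem.Dict.getD_empty, List.nil_append, hkvs]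
    exact pvFilterMap data_arr k
  -- B's first component
  have hB1 : (data_arr.foldl (fun (st : List (Int × Int) × PySem.Set (Int × Int)) data =>
        let p : Int × Int := (PySem.List.pyGetD data 0 0, PySem.List.pyGetD data 2 0)
        if PySem.Set.contains st.2 p then st
        else (st.1 ++ [p], PySem.Set.add st.2 p)) ([], PySem.Set.empty)).1 =
      PySem.Set.ofList (data_arr.map pvKey) := by
    rw [show (([], PySem.Set.empty) : List (Int × Int) × PySem.Set (Int × Int)) =
        ((PySem.Set.empty : PySem.Set (Int × Int)), (PySem.Set.empty : PySem.Set (Int × Int))) from rfl]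
    rw [pvFoldB_eq data_arr PySem.Set.empty]
    simp [PySem.Set.update, PySem.Set.ofList_eq_foldl]
  rw [hB1, pvItems_eq_keys_map dA hnodup, hkeys, List.map_map]
  apply List.map_congr_left
  intro k _
  simp only [Function.comp]
  rw [hgetD k]
  simp [pvKey, pvRel]

-- ===== VERDICT (by name: the statement is the Claim_ definition above) =====
theorem get_ent_to_rel_spec : Claim_equal_get_ent_to_rel := by
  intro data_arr _ _
  unfold Spec_get_ent_to_rel
  exact get_ent_to_rel_eq data_arr
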